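-- pv_equiv track=rewrite | github.com/pjaehyun/TIL | PS/leetcode/2391.Minimum Amount of Time to Collect Garbage.py | garbageCollection
-- ===== SOURCE A (Python) =====
-- from typing import List
--
-- def garbageCollection(garbage: List[str], travel: List[int]) -> int:
--     visited = set()
--
--     travel_time = 0
--     collect_time = 0
--
--     idx = len(garbage) - 1
--     while garbage:
--         house = garbage.pop()
--         collect_time += len(house)
--         for trash in house:
--             if trash not in visited:
--                 travel_time += sum(travel[:idx])
--                 visited.add(trash)
--
--         idx -= 1
--     return travel_time + collect_time
-- ===== SOURCE B (Python) =====
-- from typing import List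
--
-- def garbageCollection(garbage: List[str], travel: List[int]) -> int:
--     collect = 0
--     run = 0            # running prefix sum of travel: run == sum(travel[:i]) at house i
--     cost = {}          # trash type -> travel cost to the furthest house (so far) containing it
--     for i, house in enumerate(garbage):
--         if 0 < i <= len(travel):
--             run += travel[i - 1]
--         collect += len(house)
--         for c in house:
--             cost[c] = run
--     return collect + sum(cost.values())
-- ===== Notes on version B (the rewrite author's own statement) =====
-- stated objective: alternative
-- what changed: A pops houses from the end and re-computes sum(travel[:idx]) at every first-seen trash type; B makes one forward pass keeping a running prefix sum of travel and a dict mapping each trash type to the travel cost of its furthest house (last write wins), then returns total collect time plus the sum of the dict's values.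
import Mathlib
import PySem

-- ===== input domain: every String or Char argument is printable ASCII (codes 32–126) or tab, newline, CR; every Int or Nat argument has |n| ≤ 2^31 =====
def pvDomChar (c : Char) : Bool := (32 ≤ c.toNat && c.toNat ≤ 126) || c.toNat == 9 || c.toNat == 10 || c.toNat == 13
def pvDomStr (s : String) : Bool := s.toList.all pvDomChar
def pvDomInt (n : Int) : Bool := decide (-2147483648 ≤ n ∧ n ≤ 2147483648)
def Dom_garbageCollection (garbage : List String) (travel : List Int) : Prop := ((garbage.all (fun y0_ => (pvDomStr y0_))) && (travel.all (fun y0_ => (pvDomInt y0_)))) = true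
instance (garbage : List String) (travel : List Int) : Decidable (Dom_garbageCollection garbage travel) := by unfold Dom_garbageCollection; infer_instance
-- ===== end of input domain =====

-- B replaces A's "pop houses from the end and re-sum travel[:idx] at every first-seen trash type"
-- with one forward pass keeping a running prefix sum and a dict trash-type -> cost of its furthest
-- house; the equivalence is about the RETURN value only (A empties its `garbage` argument in place
-- via pop(), B does not mutate it).

-- ===== PORT A =====
-- inner `for trash in house:` loop; state = (visited, travel_time)
def pvAHouse (travel : List Int) (idx : Int) (st : PySem.Set Char × Int) (house : List Char) :
    PySem.Set Char × Int :=
  house.foldl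
    (fun s trash =>
      if s.1.contains trash then s
      else (PySem.Set.add s.1 trash, s.2 + (PySem.List.slice travel none (some idx)).sum))
    st

-- `while garbage: house = garbage.pop()` consumes the houses back to front: the loop is recursion
-- over `garbage.reverse`, carrying the same state (visited, travel_time, collect_time, idx)
def pvALoop (travel : List Int) : List String → PySem.Set Char → Int → Int → Int → Int
  | [], _, travelTime, collectTime, _ => travelTime + collectTime
  | house :: rest, visited, travelTime, collectTime, idx =>
      let collectTime' := collectTime + PySem.Str.len house
      let st := pvAHouse travel idx (visited, travelTime) house.toList
      pvALoop travel rest st.1 st.2 collectTime' (idx - 1)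

def garbageCollection (garbage : List String) (travel : List Int) : Int :=
  pvALoop travel garbage.reverse PySem.Set.empty 0 0 ((garbage.length : Int) - 1)

-- ===== PORT B =====
-- one iteration of `for i, house in enumerate(garbage):`; state = (run, collect, cost)
def pvBStep (travel : List Int) (st : Int × Int × PySem.Dict Char Int) (p : Int × String) :
    Int × Int × PySem.Dict Char Int :=
  -- `if 0 < i <= len(travel): run += travel[i - 1]` — the guard keeps the index in range,
  -- so pyGetD's default 0 is never used
  let run := if 0 < p.1 ∧ p.1 ≤ (travel.length : Int) then st.1 + PySem.List.pyGetD travel (p.1 - 1) 0 else st.1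
  let collect := st.2.1 + PySem.Str.len p.2
  let cost := p.2.toList.foldl (fun d c => d.insert c run) st.2.2
  (run, collect, cost)

def garbageCollection_alt (garbage : List String) (travel : List Int) : Int :=
  let st := (PySem.List.enumerate garbage).foldl (pvBStep travel) (0, 0, PySem.Dict.empty)
  st.2.1 + (PySem.Dict.values st.2.2).sum

-- ===== PRECONDITION & SPEC =====
def Spec_garbageCollection (garbage : List String) (travel : List Int) (out : Int) : Prop := out = garbageCollection_alt garbage travel
instance (garbage : List String) (travel : List Int) (out : Int) : Decidable (Spec_garbageCollection garbage travel out) := by unfold Spec_garbageCollection; infer_instance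

-- ===== CLAIM (what is proved, stated in full; the proofs are below) =====
def Claim_equal_garbageCollection : Prop := ∀ (garbage : List String) (travel : List Int), Dom_garbageCollection garbage travel → Spec_garbageCollection garbage travel (garbageCollection garbage travel)

-- ===== LEMMAS AND PROOFS =====

-- prefix sum of travel, clipped at its length (Python's sum(travel[:k]))
def pvS (travel : List Int) (k : Nat) : Int := (travel.take k).sum

-- houses paired with the prefix-sum cost of their index, forward, starting at index k
def pvFw (travel : List Int) : List String → Nat → List (Int × List Char)
  | [], _ => []
  | h :: t, k => (pvS travel k, h.toList) :: pvFw travel t (k + 1)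

-- "first occurrence wins" spec of A's reversed scan, at house granularity
def pvAspec : List (Int × List Char) → Finset Char → Int
  | [], _ => 0
  | (s, h) :: t, V => (∑ _c ∈ h.toFinset \ V, s) + pvAspec t (V ∪ h.toFinset)

-- "last write wins" dict of B's forward scan
def pvLdict (l : List (Int × List Char)) (d : PySem.Dict Char Int) : PySem.Dict Char Int :=
  l.foldl (fun d p => p.2.foldl (fun d c => d.insert c p.1) d) d

-- sum of a dict's values outside a visited set
def pvDsum (d : PySem.Dict Char Int) (V : Finset Char) : Int :=
  ∑ c ∈ d.keys.toFinset \ V, d.getD c 0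

-- ---- small Set/Finset bridges ----
lemma pvSet_toFinset_add (v : PySem.Set Char) (c : Char) :
    (PySem.Set.add v c).toFinset = insert c v.toFinset := by
  ext x; simp [PySem.Set.mem_add, or_comm]

lemma pvSet_toFinset_update (v : PySem.Set Char) (h : List Char) :
    (PySem.Set.update v h).toFinset = v.toFinset ∪ h.toFinset := by
  ext x; simp [PySem.Set.mem_update]

lemma pvInsert_erase_sum (c : Char) (X : Finset Char) (s : Int) :
    ∑ _x ∈ insert c X, s = s + ∑ _x ∈ X.erase c, s := by
  have h1 : insert c X = insert c (X.erase c) := by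
    ext x; by_cases hx : x = c <;> simp [hx]
  rw [h1, Finset.sum_insert (Finset.notMem_erase c X)]

-- ---- A side ----
lemma pvAHouse_eq (travel : List Int) (idx : Int) (h : List Char) :
    ∀ (v : PySem.Set Char) (tt : Int),
      pvAHouse travel idx (v, tt) h =
        (PySem.Set.update v h,
          tt + ∑ _c ∈ h.toFinset \ v.toFinset, (PySem.List.slice travel none (some idx)).sum) := by
  induction h with
  | nil => intro v tt; simp [pvAHouse, PySem.Set.update]
  | cons c cs ih =>
    intro v tt
    by_cases hc : c ∈ v
    · have hcb : v.contains c = true := by simpa [PySem.Set.contains] using hc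
      have hadd : PySem.Set.add v c = v := by simp [PySem.Set.add, hcb, hc]
      have hupd : PySem.Set.update v (c :: cs) = PySem.Set.update v cs := by
        simp [PySem.Set.update, hadd]
      have hsd : (c :: cs).toFinset \ v.toFinset = cs.toFinset \ v.toFinset := by
        ext x
        by_cases hx : x = c <;> simp [hx, hc, List.mem_toFinset]
      simp only [pvAHouse, List.foldl_cons, hcb]
      rw [if_pos trivial]
      rw [show (List.foldl _ (v, tt) cs : PySem.Set Char × Int) = pvAHouse travel idx (v, tt) cs from rfl]
      rw [ih v tt, hupd, hsd]
    · have hcb : v.contains c = false := by simp [PySem.Set.contains, hc]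
      have hupd : PySem.Set.update v (c :: cs) = PySem.Set.update (PySem.Set.add v c) cs := by
        simp [PySem.Set.update]
      simp only [pvAHouse, List.foldl_cons, hcb]
      rw [if_neg (by simp)]
      rw [show (List.foldl _ (PySem.Set.add v c, tt + _) cs : PySem.Set Char × Int) =
          pvAHouse travel idx (PySem.Set.add v c, tt + (PySem.List.slice travel none (some idx)).sum) cs from rfl]
      rw [ih, hupd, pvSet_toFinset_add]
      congr 1
      have hs1 : (c :: cs).toFinset \ v.toFinset = insert c (cs.toFinset \ v.toFinset) := by
        ext x
        by_cases hx : x = c <;> simp [hx, hc, List.mem_toFinset]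
      have hs2 : cs.toFinset \ insert c v.toFinset = (cs.toFinset \ v.toFinset).erase c := by
        ext x
        by_cases hx : x = c <;> simp [hx, List.mem_toFinset]
      rw [hs1, pvInsert_erase_sum, hs2]
      ring

lemma pvFw_append_singleton (travel : List Int) (g : List String) (h : String) :
    ∀ k : Nat, pvFw travel (g ++ [h]) k = pvFw travel g k ++ [(pvS travel (k + g.length), h.toList)] := by
  induction g with
  | nil => intro k; simp [pvFw]
  | cons a t ih =>
    intro k
    simp only [List.cons_append, pvFw, ih (k + 1), List.length_cons]
    rw [show k + 1 + t.length = k + (t.length + 1) from by omega]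

lemma pvSlice_sum (travel : List Int) (n : Nat) :
    (PySem.List.slice travel none (some (n : Int))).sum = pvS travel n := by
  rw [PySem.List.slice_to travel (by positivity : (0 : Int) ≤ (n : Int))]
  simp [pvS]

lemma pvALoop_eq (travel : List Int) (g : List String) :
    ∀ (v : PySem.Set Char) (tt ct : Int),
      pvALoop travel g.reverse v tt ct ((g.length : Int) - 1) =
        tt + ct + (g.map PySem.Str.len).sum + pvAspec (pvFw travel g 0).reverse v.toFinset := by
  induction g using List.reverseRecOn with
  | nil => intro v tt ct; simp [pvALoop, pvFw, pvAspec]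
  | append_singleton g' h ih =>
    intro v tt ct
    have hrev : (g' ++ [h]).reverse = h :: g'.reverse := by simp
    have hlen : ((g' ++ [h]).length : Int) - 1 = (g'.length : Int) := by
      simp only [List.length_append, List.length_cons, List.length_nil]
      omega
    rw [hrev, hlen]
    simp only [pvALoop]
    rw [pvAHouse_eq, pvSlice_sum travel g'.length]
    have hidx : (g'.length : Int) - 1 = ((g'.length : Int)) - 1 := rfl
    rw [ih (PySem.Set.update v h.toList)
        (tt + ∑ _c ∈ h.toList.toFinset \ v.toFinset, pvS travel g'.length)
        (ct + PySem.Str.len h)]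
    rw [pvFw_append_singleton travel g' h 0]
    simp only [List.reverse_append, List.reverse_cons, List.reverse_nil, List.nil_append,
      List.cons_append, pvAspec, Nat.zero_add]
    rw [pvSet_toFinset_update]
    simp only [List.map_append, List.map_cons, List.map_nil, List.sum_append, List.sum_cons,
      List.sum_nil]
    ring

-- ---- B side ----
lemma pvBatch_getD (run : Int) (h : List Char) :
    ∀ (d : PySem.Dict Char Int) (c : Char),
      (h.foldl (fun d c => d.insert c run) d).getD c 0 = if c ∈ h then run else d.getD c 0 := by
  induction h with
  | nil => intro d c; simp
  | cons a t ih =>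
    intro d c
    simp only [List.foldl_cons, ih, PySem.Dict.getD_insert]
    by_cases hct : c ∈ t <;> by_cases hca : c = a <;> simp [hct, hca]

lemma pvBatch_keys (run : Int) (h : List Char) :
    ∀ (d : PySem.Dict Char Int) (c : Char),
      (c ∈ (h.foldl (fun d c => d.insert c run) d).keys ↔ c ∈ d.keys ∨ c ∈ h) := by
  induction h with
  | nil => intro d c; simp
  | cons a t ih =>
    intro d c
    simp only [List.foldl_cons, ih, PySem.Dict.mem_keys_insert, List.mem_cons]
    tauto

lemma pvLdict_nodup (l : List (Int × List Char)) :
    ∀ d : PySem.Dict Char Int, d.keys.Nodup → (pvLdict l d).keys.Nodup := by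
  induction l with
  | nil => intro d hd; simpa [pvLdict] using hd
  | cons p t ih =>
    intro d hd
    simp only [pvLdict, List.foldl_cons]
    exact ih _ (PySem.Dict.nodup_keys_foldl_insert p.2 (fun _ _ => p.1) d hd)

lemma pvS_succ (travel : List Int) (k : Nat) :
    (if 0 < ((k : Int) + 1) ∧ ((k : Int) + 1) ≤ (travel.length : Int)
      then pvS travel k + PySem.List.pyGetD travel (((k : Int) + 1) - 1) 0 else pvS travel k) =
    pvS travel (k + 1) := by
  by_cases hk : k < travel.length
  · rw [if_pos (by constructor <;> omega)]
    have h1 : ((k : Int) + 1) - 1 = (k : Int) := by ring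
    rw [h1, PySem.List.pyGetD_of_nonneg travel 0 (by positivity)]
    have h2 : ((k : Int)).toNat = k := by omega
    rw [h2]
    rw [pvS, pvS, List.sum_take_succ travel k hk]
    simp [List.getD, hk]
  · rw [if_neg (by push_neg; intro _; omega)]
    rw [pvS, pvS, List.take_of_length_le (by omega), List.take_of_length_le (by omega)]

lemma pvEnumerate_cons {α : Type} (h : α) (t : List α) (k : Int) :
    PySem.List.enumerate (h :: t) k = (k, h) :: PySem.List.enumerate t (k + 1) := by
  simp [PySem.List.enumerate]

lemma pvBLoop_eq (travel : List Int) (g : List String) :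
    ∀ (k : Nat) (col : Int) (d : PySem.Dict Char Int),
      (PySem.List.enumerate g ((k : Int) + 1)).foldl (pvBStep travel) (pvS travel k, col, d) =
        (pvS travel (k + g.length), col + (g.map PySem.Str.len).sum,
          pvLdict (pvFw travel g (k + 1)) d) := by
  induction g with
  | nil => intro k col d; simp [PySem.List.enumerate, pvFw, pvLdict]
  | cons h t ih =>
    intro k col d
    rw [pvEnumerate_cons]
    simp only [List.foldl_cons]
    have hstep : pvBStep travel (pvS travel k, col, d) ((k : Int) + 1, h) =
        (pvS travel (k + 1), col + PySem.Str.len h,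
          h.toList.foldl (fun d c => d.insert c (pvS travel (k + 1))) d) := by
      simp only [pvBStep]
      rw [pvS_succ travel k]
    rw [hstep]
    have hcast : ((k : Int) + 1) + 1 = (((k + 1 : Nat) : Int)) + 1 := by push_cast; ring
    rw [hcast, ih (k + 1)]
    simp only [pvFw, pvLdict, List.foldl_cons, List.length_cons, List.map_cons, List.sum_cons]
    rw [show k + 1 + t.length = k + (t.length + 1) from by omega, add_assoc]

-- ---- the bridge: first-wins over the reversed list = last-wins dict over the forward list ----
lemma pvDsum_batch (d : PySem.Dict Char Int) (hd : d.keys.Nodup) (h : List Char) (s : Int)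
    (V : Finset Char) :
    pvDsum (h.foldl (fun d c => d.insert c s) d) V =
      (∑ _c ∈ h.toFinset \ V, s) + pvDsum d (V ∪ h.toFinset) := by
  have hkeys : (h.foldl (fun d c => d.insert c s) d).keys.toFinset =
      d.keys.toFinset ∪ h.toFinset := by
    ext x; simp [List.mem_toFinset, pvBatch_keys]
  have hsplit : (d.keys.toFinset ∪ h.toFinset) \ V =
      (h.toFinset \ V) ∪ (d.keys.toFinset \ (V ∪ h.toFinset)) := by
    ext x
    simp only [Finset.mem_sdiff, Finset.mem_union]
    tauto
  have hdisj : Disjoint (h.toFinset \ V) (d.keys.toFinset \ (V ∪ h.toFinset)) := by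
    simp only [Finset.disjoint_left, Finset.mem_sdiff, Finset.mem_union]
    tauto
  rw [pvDsum, hkeys, hsplit, Finset.sum_union hdisj]
  congr 1
  · apply Finset.sum_congr rfl
    intro c hcmem
    have hch : c ∈ h := by
      have := (Finset.mem_sdiff.mp hcmem).1
      simpa [List.mem_toFinset] using this
    rw [pvBatch_getD, if_pos hch]
  · apply Finset.sum_congr rfl
    intro c hcmem
    have hch : c ∉ h := by
      have := (Finset.mem_sdiff.mp hcmem).2
      simp only [Finset.mem_union, List.mem_toFinset] at this
      tauto
    rw [pvBatch_getD, if_neg hch]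

lemma pvBridge (ps : List (Int × List Char)) :
    ∀ V : Finset Char, pvAspec ps V = pvDsum (pvLdict ps.reverse PySem.Dict.empty) V := by
  induction ps with
  | nil => intro V; simp [pvAspec, pvLdict, pvDsum, PySem.Dict.keys_empty]
  | cons p t ih =>
    intro V
    obtain ⟨s, h⟩ := p
    have hrev : ((s, h) :: t).reverse = t.reverse ++ [(s, h)] := by simp
    have hld : pvLdict (t.reverse ++ [(s, h)]) PySem.Dict.empty =
        h.foldl (fun d c => d.insert c s) (pvLdict t.reverse PySem.Dict.empty) := by
      simp [pvLdict, List.foldl_append]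
    rw [hrev, hld]
    have hnd : (pvLdict t.reverse PySem.Dict.empty).keys.Nodup :=
      pvLdict_nodup t.reverse PySem.Dict.empty (by simp [PySem.Dict.keys_empty])
    rw [pvDsum_batch _ hnd]
    simp only [pvAspec]
    rw [ih (V ∪ h.toFinset)]

-- empty-set corner of pvDsum and values-sum bridge
lemma pvValues_sum (d : PySem.Dict Char Int) (hd : d.keys.Nodup) :
    (PySem.Dict.values d).sum = pvDsum d ∅ := by
  rw [PySem.Dict.values_eq_map_keys d hd 0, pvDsum, Finset.sdiff_empty, List.sum_toFinset _ hd]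

-- ===== VERDICT (by name: the statement is the Claim_ definition above) =====
theorem garbageCollection_spec : Claim_equal_garbageCollection := by
  intro garbage travel _
  show garbageCollection garbage travel = garbageCollection_alt garbage travel
  -- A side
  have hA : garbageCollection garbage travel =
      (garbage.map PySem.Str.len).sum + pvAspec (pvFw travel garbage 0).reverse ∅ := by
    rw [garbageCollection, pvALoop_eq]
    simp [PySem.Set.empty]
  -- B side
  have hB : garbageCollection_alt garbage travel =
      (garbage.map PySem.Str.len).sum +
        (PySem.Dict.values (pvLdict (pvFw travel garbage 0) PySem.Dict.empty)).sum := by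
    rw [garbageCollection_alt]
    cases garbage with
    | nil => simp [PySem.List.enumerate, pvFw, pvLdict]
    | cons h t =>
      rw [pvEnumerate_cons]
      simp only [List.foldl_cons]
      have hstep : pvBStep travel (0, 0, PySem.Dict.empty) ((0 : Int), h) =
          (pvS travel 0, 0 + PySem.Str.len h,
            h.toList.foldl (fun d c => d.insert c (pvS travel 0)) PySem.Dict.empty) := by
        simp [pvBStep, pvS]
      rw [hstep]
      have hcast : (0 : Int) + 1 = ((0 : Nat) : Int) + 1 := by norm_num
      rw [hcast, pvBLoop_eq travel t 0]
      simp only [pvFw, pvLdict, List.foldl_cons, List.map_cons, List.sum_cons]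
      ring_nf
  rw [hA, hB]
  have hnd : (pvLdict (pvFw travel garbage 0) PySem.Dict.empty).keys.Nodup :=
    pvLdict_nodup _ PySem.Dict.empty (by simp [PySem.Dict.keys_empty])
  rw [pvValues_sum _ hnd]
  have := pvBridge ((pvFw travel garbage 0).reverse) ∅
  rw [List.reverse_reverse] at this
  rw [this]
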